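-- pv_equiv track=rewrite | github.com/mikhail-dvorkin/competitions | hackerrank/weekofcode27/hackonacci-matrix-rotations.py | solve
-- ===== SOURCE A (Python) =====
-- def solve(n, queries):
-- 	a = [[((i + 1) * (j + 1)) ** 2 % 7 in [0, 1, 3, 6] for j in range(n)] for i in range(n)]
-- 	b = a
-- 	ans = []
-- 	for i in range(4):
-- 		diff = 0
-- 		for i in range(n):
-- 			for j in range(n):
-- 				if a[i][j] != b[i][j]:
-- 					diff += 1
-- 		ans.append(diff)
-- 		b = rotate(b)
-- 	return [ans[q // 90 % 4] for q in queries]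
--
-- def rotate(a):
-- 	return [[a[j][i] for j in range(len(a))] for i in range(len(a[0]) - 1, -1, -1)]
-- ===== SOURCE B (Python) =====
-- def solve(n, queries):
--     # Value of cell (i, j) depends only on (i+1)*(j+1) mod 7: the squares mod 7
--     # lying in {0,1,3,6} are exactly {0,1}, i.e. (i+1)*(j+1) % 7 in {0,1,6}.
--     def val(i, j):
--         return ((i + 1) * (j + 1)) % 7 in (0, 1, 6)
--     # cnt[r] = how many indices i in range(n) have i % 7 == r
--     cnt = [n // 7 + (1 if r < n % 7 else 0) for r in range(7)]
--     m = n - 1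
--     def diff(other):
--         return sum(cnt[i] * cnt[j]
--                    for i in range(7) for j in range(7)
--                    if val(i, j) != other(i, j))
--     ans = [0,
--            diff(lambda i, j: val(j, m - i)),
--            diff(lambda i, j: val(m - i, m - j)),
--            diff(lambda i, j: val(m - j, i))]
--     return [ans[q // 90 % 4] for q in queries]
-- ===== Notes on version B (the rewrite author's own statement) =====
-- stated objective: faster
-- what changed: B never builds the n-by-n matrix: the cell value depends only on (i+1)*(j+1) mod 7, so B counts, per residue class pair (i%7, j%7), how many cells differ under each rotation using the 7 residue-class sizes, a 49-term sum per rotation.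
import Mathlib
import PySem

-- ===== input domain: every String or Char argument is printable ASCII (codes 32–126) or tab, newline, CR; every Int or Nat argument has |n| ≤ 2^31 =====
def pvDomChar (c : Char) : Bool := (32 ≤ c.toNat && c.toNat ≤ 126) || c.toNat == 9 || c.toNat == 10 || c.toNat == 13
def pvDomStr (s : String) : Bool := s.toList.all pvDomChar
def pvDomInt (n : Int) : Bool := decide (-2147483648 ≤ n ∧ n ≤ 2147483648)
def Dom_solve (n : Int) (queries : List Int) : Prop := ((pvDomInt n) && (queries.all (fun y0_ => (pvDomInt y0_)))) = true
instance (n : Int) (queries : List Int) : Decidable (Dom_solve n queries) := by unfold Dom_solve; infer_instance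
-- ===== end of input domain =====

-- B replaces A's O(n^2) matrix scan by a 49-term residue-class count (the cell value
-- has period 7 in each index); B is intended to be asymptotically faster.

-- ===== PORT A =====
-- The n × n boolean matrix is held as Array (Array Bool); indexing a[i][j] is ported as
-- arr[i.toNat]![j.toNat]! — exact here because every index produced by the loops is
-- non-negative and in range.  rotate(a): Python raises IndexError on a = [] (a[0]), which
-- happens exactly when n ≤ 0; Pre_solve excludes those inputs (the port panics there too).
def rotate (a : Array (Array Bool)) : Array (Array Bool) :=
  ((PySem.List.pyRange ((a[0]!.size : Int) - 1) (-1) (-1)).map (fun i =>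
    ((PySem.List.pyRange 0 (a.size : Int) 1).map (fun j =>
      (a[j.toNat]!)[i.toNat]!)).toArray)).toArray

def solve (n : Int) (queries : List Int) : List Int :=
  let a : Array (Array Bool) := ((PySem.List.pyRange 0 n 1).map (fun i =>
    ((PySem.List.pyRange 0 n 1).map (fun j =>
      decide (PySem.Int.mod (((i + 1) * (j + 1)) ^ 2) 7 ∈ ([0, 1, 3, 6] : List Int)))).toArray)).toArray
  let st : Array (Array Bool) × List Int :=
    (PySem.List.pyRange 0 4 1).foldl (fun st _ =>
      let b := st.1
      let diff : Int := (PySem.List.pyRange 0 n 1).foldl (fun acc i =>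
        (PySem.List.pyRange 0 n 1).foldl (fun acc j =>
          if (a[i.toNat]!)[j.toNat]! ≠ (b[i.toNat]!)[j.toNat]!
          then acc + 1 else acc) acc) 0
      (rotate b, st.2 ++ [diff])) (a, [])
  queries.map (fun q => PySem.List.pyGetD st.2 (PySem.Int.mod (PySem.Int.floordiv q 90) 4) 0)

-- ===== PORT B =====
def valB (i j : Int) : Bool := decide (PySem.Int.mod ((i + 1) * (j + 1)) 7 ∈ ([0, 1, 6] : List Int))

def solve_alt (n : Int) (queries : List Int) : List Int :=
  let cnt : List Int := (PySem.List.pyRange 0 7 1).map (fun r =>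
    PySem.Int.floordiv n 7 + if r < PySem.Int.mod n 7 then (1 : Int) else 0)
  let m := n - 1
  let diff : (Int → Int → Bool) → Int := fun other =>
    (PySem.List.pyRange 0 7 1).foldl (fun acc i =>
      (PySem.List.pyRange 0 7 1).foldl (fun acc j =>
        if valB i j ≠ other i j
        then acc + PySem.List.pyGetD cnt i 0 * PySem.List.pyGetD cnt j 0
        else acc) acc) 0
  let ans : List Int := [0,
    diff (fun i j => valB j (m - i)),
    diff (fun i j => valB (m - i) (m - j)),
    diff (fun i j => valB (m - j) i)]
  queries.map (fun q => PySem.List.pyGetD ans (PySem.Int.mod (PySem.Int.floordiv q 90) 4) 0)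

-- ===== PRECONDITION & SPEC =====
-- Pre_ excludes n ≤ 0, on which A raises IndexError (rotate of the empty matrix).
def Pre_solve (n : Int) (queries : List Int) : Prop := 1 ≤ n
instance (n : Int) (queries : List Int) : Decidable (Pre_solve n queries) := by unfold Pre_solve; infer_instance
def pvWitness_solve : Int × List Int := (3, [0, 90, 180, 270, -90, 450])

def Spec_solve (n : Int) (queries : List Int) (out : List Int) : Prop := out = solve_alt n queries
instance (n : Int) (queries : List Int) (out : List Int) : Decidable (Spec_solve n queries out) := by unfold Spec_solve; infer_instance

-- ===== CLAIM (what is proved, stated in full; the proofs are below) =====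
def Claim_equal_solve : Prop := ∀ (n : Int) (queries : List Int), Dom_solve n queries → Pre_solve n queries → Spec_solve n queries (solve n queries)


-- ===== LEMMAS AND PROOFS =====

-- Proof-side names for the sub-expressions of the two ports (definitionally equal to them).
def fA (i j : Int) : Bool := decide (PySem.Int.mod (((i + 1) * (j + 1)) ^ 2) 7 ∈ ([0, 1, 3, 6] : List Int))

def matA (n : Int) : Array (Array Bool) :=
  ((PySem.List.pyRange 0 n 1).map (fun i =>
    ((PySem.List.pyRange 0 n 1).map (fun j => fA i j)).toArray)).toArray

def dA (n : Int) (b : Array (Array Bool)) : Int :=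
  (PySem.List.pyRange 0 n 1).foldl (fun acc i =>
    (PySem.List.pyRange 0 n 1).foldl (fun acc j =>
      if ((matA n)[i.toNat]!)[j.toNat]! ≠ (b[i.toNat]!)[j.toNat]!
      then acc + 1 else acc) acc) 0

def stA (n : Int) : Array (Array Bool) × List Int :=
  (PySem.List.pyRange 0 4 1).foldl (fun st _ => (rotate st.1, st.2 ++ [dA n st.1])) (matA n, [])

def cntB (n : Int) : List Int :=
  (PySem.List.pyRange 0 7 1).map (fun r =>
    PySem.Int.floordiv n 7 + if r < PySem.Int.mod n 7 then (1 : Int) else 0)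

def dB (n : Int) (other : Int → Int → Bool) : Int :=
  (PySem.List.pyRange 0 7 1).foldl (fun acc i =>
    (PySem.List.pyRange 0 7 1).foldl (fun acc j =>
      if valB i j ≠ other i j
      then acc + PySem.List.pyGetD (cntB n) i 0 * PySem.List.pyGetD (cntB n) j 0
      else acc) acc) 0

theorem solveA_eq (n : Int) (qs : List Int) :
    solve n qs = qs.map (fun q => PySem.List.pyGetD (stA n).2 (PySem.Int.mod (PySem.Int.floordiv q 90) 4) 0) := rfl

theorem solveB_eq (n : Int) (qs : List Int) :
    solve_alt n qs = qs.map (fun q => PySem.List.pyGetD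
      [0, dB n (fun i j => valB j ((n - 1) - i)),
          dB n (fun i j => valB ((n - 1) - i) ((n - 1) - j)),
          dB n (fun i j => valB ((n - 1) - j) i)]
      (PySem.Int.mod (PySem.Int.floordiv q 90) 4) 0) := rfl

theorem stA_snd (n : Int) :
    (stA n).2 = [dA n (matA n), dA n (rotate (matA n)), dA n (rotate (rotate (matA n))),
                 dA n (rotate (rotate (rotate (matA n))))] := by
  unfold stA
  rw [show PySem.List.pyRange 0 4 1 = [0, 1, 2, 3] by decide]
  simp [List.foldl]

-- canonical n × n matrix of a function of the two (cast) indices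
def MatN (N : Nat) (g : Int → Int → Bool) : Array (Array Bool) :=
  ((List.range N).map (fun (i : Nat) =>
    ((List.range N).map (fun (j : Nat) => g (i : Int) (j : Int))).toArray)).toArray

theorem matA_eq (N : Nat) : matA (N : Int) = MatN N fA := by
  unfold matA MatN
  rw [PySem.List.pyRange_zero_natCast, List.map_map]
  refine congrArg List.toArray ?_
  apply List.map_congr_left
  intro i _
  simp only [Function.comp_apply]
  rw [List.map_map]
  rfl

theorem MatN_get (N : Nat) (g : Int → Int → Bool) (i j : Nat) (hi : i < N) (hj : j < N) :
    ((MatN N g)[i]!)[j]! = g (i : Int) (j : Int) := by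
  unfold MatN
  rw [getElem!_pos _ i (by simpa using hi), List.getElem_toArray, List.getElem_map,
      List.getElem_range, getElem!_pos _ j (by simpa using hj), List.getElem_toArray,
      List.getElem_map, List.getElem_range]

theorem MatN_row0 (N : Nat) (g : Int → Int → Bool) (hN : 0 < N) :
    (MatN N g)[0]! = ((List.range N).map (fun (j : Nat) => g 0 (j : Int))).toArray := by
  unfold MatN
  rw [getElem!_pos _ 0 (by simpa using hN), List.getElem_toArray, List.getElem_map,
      List.getElem_range]
  norm_num

theorem rot_MatN (N : Nat) (hN : 0 < N) (g : Int → Int → Bool) :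
    rotate (MatN N g) = MatN N (fun i j => g j ((N : Int) - 1 - i)) := by
  unfold rotate
  rw [show (((MatN N g)[0]!.size : Nat) : Int) = ((N : Nat) : Int) by
        rw [MatN_row0 N g hN]; simp]
  rw [show (((MatN N g).size : Nat) : Int) = ((N : Nat) : Int) by simp [MatN]]
  rw [PySem.List.pyRange_neg_one, show ((N : Int) - 1 - (-1)).toNat = N by omega,
      PySem.List.pyRange_zero_natCast, List.map_map]
  show _ = ((List.range N).map (fun (i : Nat) =>
    ((List.range N).map (fun (j : Nat) => g (j : Int) ((N : Int) - 1 - (i : Int)))).toArray)).toArray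
  refine congrArg List.toArray ?_
  apply List.map_congr_left
  intro k hk
  have hk' : k < N := List.mem_range.mp hk
  simp only [Function.comp_apply]
  rw [List.map_map]
  refine congrArg List.toArray ?_
  apply List.map_congr_left
  intro j hj
  have hj' : j < N := List.mem_range.mp hj
  simp only [Function.comp_apply, Int.toNat_natCast]
  rw [show ((N : Int) - 1 - (k : Int)).toNat = N - 1 - k by omega]
  rw [MatN_get N g j (N - 1 - k) hj' (by omega)]
  congr 1
  omega

-- sums over ranges
def SumN (N : Nat) (h : Nat → Int) : Int := ((List.range N).map h).sum

theorem SumN_succ (N : Nat) (h : Nat → Int) : SumN (N + 1) h = SumN N h + h N := by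
  simp [SumN, List.range_succ]

theorem foldl_if_add {α : Type} (l : List α) (p : α → Prop) [DecidablePred p] (w : α → Int) (a : Int) :
    l.foldl (fun acc x => if p x then acc + w x else acc) a
      = a + (l.map (fun x => if p x then w x else 0)).sum := by
  induction l generalizing a with
  | nil => simp
  | cons x xs ih =>
    simp only [List.foldl_cons, List.map_cons, List.sum_cons]
    by_cases h : p x <;> simp [h, ih] <;> ring

theorem dA_eval (N : Nat) (g : Int → Int → Bool) :
    dA (N : Int) (MatN N g)
      = SumN N (fun i => SumN N (fun j => if fA (i : Int) (j : Int) ≠ g (i : Int) (j : Int) then 1 else 0)) := by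
  unfold dA
  rw [matA_eq, PySem.List.pyRange_zero_natCast, List.foldl_map]
  rw [PySem.List.foldl_congr_mem (List.range N) _
      (fun acc (i : Nat) => acc + SumN N (fun j => if fA (i : Int) (j : Int) ≠ g (i : Int) (j : Int) then 1 else 0)) 0 ?_]
  · rw [PySem.List.foldl_add]
    simp [SumN]
  · intro acc i hi
    have hi' : i < N := List.mem_range.mp hi
    simp only []
    rw [List.foldl_map]
    rw [PySem.List.foldl_congr_mem (List.range N) _
        (fun acc (j : Nat) => if fA (i : Int) (j : Int) ≠ g (i : Int) (j : Int) then acc + 1 else acc) acc ?_]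
    · rw [foldl_if_add]
      simp [SumN]
    · intro acc2 j hj
      have hj' : j < N := List.mem_range.mp hj
      simp only [Int.toNat_natCast]
      simp only [MatN_get N fA i j hi' hj', MatN_get N g i j hi' hj']

-- residue-class sizes
def ccI (N r : Nat) : Int := SumN N (fun i => if i % 7 = r then 1 else 0)

theorem ccI_succ (N r : Nat) : ccI (N + 1) r = ccI N r + (if N % 7 = r then 1 else 0) := by
  unfold ccI; rw [SumN_succ]

theorem ccI_closed (N r : Nat) (hr : r < 7) :
    ccI N r = (N : Int) / 7 + if (r : Int) < (N : Int) % 7 then 1 else 0 := by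
  induction N with
  | zero => simp [ccI, SumN]
  | succ N ih =>
    rw [ccI_succ, ih]
    clear ih
    have h1 : ((N : Int) + 1) / 7 = (N : Int) / 7 + (if (N : Int) % 7 = 6 then 1 else 0) := by
      split_ifs <;> omega
    have h2 : (N % 7 = r) ↔ ((N : Int) % 7 = (r : Int)) := by omega
    push_cast
    split_ifs <;> omega

theorem sum7_pick (m : Nat) (hm : m < 7) (g : Nat → Int) :
    SumN 7 (fun r => (if m = r then (1 : Int) else 0) * g r) = g m := by
  interval_cases m <;> simp [SumN, List.range_succ]

theorem L1 (N : Nat) (g : Nat → Int) :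
    SumN N (fun i => g (i % 7)) = SumN 7 (fun r => ccI N r * g r) := by
  induction N with
  | zero => simp [SumN, ccI]
  | succ N ih =>
    rw [SumN_succ, ih]
    have : SumN 7 (fun r => ccI (N + 1) r * g r)
        = SumN 7 (fun r => ccI N r * g r + (if N % 7 = r then 1 else 0) * g r) := by
      unfold SumN
      apply congrArg
      apply List.map_congr_left
      intro r _
      rw [ccI_succ]; ring
    rw [this]
    unfold SumN
    rw [PySem.List.sum_map_add_int]
    have := sum7_pick (N % 7) (Nat.mod_lt _ (by norm_num)) g
    unfold SumN at this
    rw [this]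

-- the two membership tests agree: squares mod 7 in {0,1,3,6} ⟺ the square is 0 or 1 mod 7
theorem fA_eq_valB (i j : Int) : fA i j = valB i j := by
  unfold fA valB
  rw [PySem.Int.mod_eq_emod_of_pos (by norm_num), PySem.Int.mod_eq_emod_of_pos (by norm_num)]
  have hp : ((i + 1) * (j + 1)) ^ 2 % 7 = (((i + 1) * (j + 1)) % 7) ^ 2 % 7 := by
    have h : (i + 1) * (j + 1) ≡ ((i + 1) * (j + 1)) % 7 [ZMOD 7] :=
      (Int.emod_emod_of_dvd _ dvd_rfl).symm
    exact h.pow 2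
  rw [hp]
  have h0 : 0 ≤ ((i + 1) * (j + 1)) % 7 := Int.emod_nonneg _ (by norm_num)
  have h7 : ((i + 1) * (j + 1)) % 7 < 7 := Int.emod_lt_of_pos _ (by norm_num)
  set r := ((i + 1) * (j + 1)) % 7 with hr
  interval_cases r <;> decide

theorem valB_congr {i i' j j' : Int} (hi : i % 7 = i' % 7) (hj : j % 7 = j' % 7) :
    valB i j = valB i' j' := by
  unfold valB
  rw [PySem.Int.mod_eq_emod_of_pos (by norm_num), PySem.Int.mod_eq_emod_of_pos (by norm_num)]
  have : (i + 1) * (j + 1) % 7 = (i' + 1) * (j' + 1) % 7 := by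
    rw [Int.mul_emod, Int.add_emod i, Int.add_emod j, hi, hj,
        ← Int.add_emod, ← Int.add_emod, ← Int.mul_emod]
  rw [this]

-- B-side reduction
theorem cntB_get (n : Int) (r : Nat) (hr : r < 7) :
    PySem.List.pyGetD (cntB n) (r : Int) 0
      = PySem.Int.floordiv n 7 + (if (r : Int) < PySem.Int.mod n 7 then 1 else 0) := by
  unfold cntB
  rw [show (7 : Int) = ((7 : Nat) : Int) from rfl]
  exact PySem.List.pyGetD_map_pyRange _ 7 r 0 hr

def cB (n : Int) (r : Nat) : Int :=
  PySem.Int.floordiv n 7 + (if (r : Int) < PySem.Int.mod n 7 then 1 else 0)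

theorem dB_eval (n : Int) (other : Int → Int → Bool) :
    dB n other = SumN 7 (fun r => SumN 7 (fun s =>
      if valB (r : Int) (s : Int) ≠ other (r : Int) (s : Int) then cB n r * cB n s else 0)) := by
  unfold dB
  rw [show (7 : Int) = ((7 : Nat) : Int) from rfl, PySem.List.pyRange_zero_natCast, List.foldl_map]
  rw [PySem.List.foldl_congr_mem _ _
      (fun acc (r : Nat) => acc + SumN 7 (fun s =>
        if valB (r : Int) (s : Int) ≠ other (r : Int) (s : Int) then cB n r * cB n s else 0)) 0 ?_]
  · rw [PySem.List.foldl_add]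
    simp [SumN]
  · intro acc r hr
    have hr' : r < 7 := List.mem_range.mp hr
    rw [List.foldl_map]
    rw [PySem.List.foldl_congr_mem _ _
        (fun acc (s : Nat) => if valB (r : Int) (s : Int) ≠ other (r : Int) (s : Int)
          then acc + cB n r * cB n s else acc) acc ?_]
    · rw [foldl_if_add]
      simp [SumN]
    · intro acc2 s hs
      have hs' : s < 7 := List.mem_range.mp hs
      rw [cntB_get n r hr', cntB_get n s hs']
      rfl

theorem ccI_eq_cB (N : Nat) (r : Nat) (hr : r < 7) : ccI N r = cB (N : Int) r := by
  rw [ccI_closed N r hr]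
  unfold cB
  rw [PySem.Int.floordiv_eq_ediv_of_pos (by norm_num), PySem.Int.mod_eq_emod_of_pos (by norm_num)]

-- master lemma: one rotated-diff equality per rotation
theorem master (N : Nat) (g : Int → Int → Bool) (other : Int → Int → Bool)
    (hg : ∀ i j : Nat, (fA (i : Int) (j : Int) ≠ g (i : Int) (j : Int)) ↔
          (valB ((i % 7 : Nat) : Int) ((j % 7 : Nat) : Int) ≠ other ((i % 7 : Nat) : Int) ((j % 7 : Nat) : Int))) :
    dA (N : Int) (MatN N g) = dB (N : Int) other := by
  rw [dA_eval, dB_eval]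
  have step1 : ∀ i : Nat,
      SumN N (fun j => if fA (i : Int) (j : Int) ≠ g (i : Int) (j : Int) then (1 : Int) else 0)
        = SumN 7 (fun s => ccI N s *
            (if valB ((i % 7 : Nat) : Int) (s : Int) ≠ other ((i % 7 : Nat) : Int) (s : Int) then 1 else 0)) := by
    intro i
    have : (fun (j : Nat) => if fA (i : Int) (j : Int) ≠ g (i : Int) (j : Int) then (1 : Int) else 0)
        = (fun (j : Nat) => (fun (s : Nat) =>
            if valB ((i % 7 : Nat) : Int) (s : Int) ≠ other ((i % 7 : Nat) : Int) (s : Int) then (1 : Int) else 0) (j % 7)) := by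
      funext j
      simp only []
      rw [if_congr (hg i j) rfl rfl]
    rw [this]
    exact L1 N (fun s => if valB ((i % 7 : Nat) : Int) (s : Int) ≠ other ((i % 7 : Nat) : Int) (s : Int) then 1 else 0)
  have step2 :
      SumN N (fun i => SumN N (fun j => if fA (i : Int) (j : Int) ≠ g (i : Int) (j : Int) then (1 : Int) else 0))
        = SumN 7 (fun r => ccI N r * SumN 7 (fun s => ccI N s *
            (if valB (r : Int) (s : Int) ≠ other (r : Int) (s : Int) then 1 else 0))) := by
    have : (fun (i : Nat) => SumN N (fun j => if fA (i : Int) (j : Int) ≠ g (i : Int) (j : Int) then (1 : Int) else 0))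
        = (fun (i : Nat) => (fun (r : Nat) => SumN 7 (fun s => ccI N s *
            (if valB (r : Int) (s : Int) ≠ other (r : Int) (s : Int) then 1 else 0))) (i % 7)) := by
      funext i
      exact step1 i
    rw [this]
    exact L1 N (fun r => SumN 7 (fun s => ccI N s *
      (if valB (r : Int) (s : Int) ≠ other (r : Int) (s : Int) then 1 else 0)))
  rw [step2]
  unfold SumN
  apply congrArg
  apply List.map_congr_left
  intro r hr
  rw [← List.sum_map_mul_left]
  apply congrArg
  apply List.map_congr_left
  intro s hs
  rw [ccI_eq_cB N r (List.mem_range.mp hr), ccI_eq_cB N s (List.mem_range.mp hs)]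
  split_ifs <;> ring

-- the four components
theorem diff0 (N : Nat) : dA (N : Int) (matA (N : Int)) = 0 := by
  rw [matA_eq, dA_eval]
  simp [SumN]

theorem ans_eq (N : Nat) (hN : 0 < N) :
    (stA (N : Int)).2
      = [0, dB (N : Int) (fun i j => valB j (((N : Int) - 1) - i)),
            dB (N : Int) (fun i j => valB (((N : Int) - 1) - i) (((N : Int) - 1) - j)),
            dB (N : Int) (fun i j => valB (((N : Int) - 1) - j) i)] := by
  rw [stA_snd]
  have h1 : rotate (matA (N : Int)) = MatN N (fun i j => fA j ((N : Int) - 1 - i)) := by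
    rw [matA_eq, rot_MatN N hN]
  have h2 : rotate (rotate (matA (N : Int)))
      = MatN N (fun i j => fA ((N : Int) - 1 - i) ((N : Int) - 1 - j)) := by
    rw [h1, rot_MatN N hN]
  have h3 : rotate (rotate (rotate (matA (N : Int))))
      = MatN N (fun i j => fA ((N : Int) - 1 - j) ((N : Int) - 1 - ((N : Int) - 1 - i))) := by
    rw [h2, rot_MatN N hN]
  have m1 : dA (N : Int) (MatN N (fun i j => fA j ((N : Int) - 1 - i)))
      = dB (N : Int) (fun i j => valB j (((N : Int) - 1) - i)) := by
    apply master
    intro i j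
    rw [fA_eq_valB, fA_eq_valB,
        valB_congr (i := (i : Int)) (i' := ((i % 7 : Nat) : Int)) (j := (j : Int)) (j' := ((j % 7 : Nat) : Int))
          (by omega) (by omega),
        valB_congr (i := (j : Int)) (i' := ((j % 7 : Nat) : Int)) (j := ((N : Int) - 1 - (i : Int)))
          (j' := ((N : Int) - 1) - ((i % 7 : Nat) : Int)) (by omega) (by omega)]
  have m2 : dA (N : Int) (MatN N (fun i j => fA ((N : Int) - 1 - i) ((N : Int) - 1 - j)))
      = dB (N : Int) (fun i j => valB (((N : Int) - 1) - i) (((N : Int) - 1) - j)) := by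
    apply master
    intro i j
    rw [fA_eq_valB, fA_eq_valB,
        valB_congr (i := (i : Int)) (i' := ((i % 7 : Nat) : Int)) (j := (j : Int)) (j' := ((j % 7 : Nat) : Int))
          (by omega) (by omega),
        valB_congr (i := (N : Int) - 1 - (i : Int)) (i' := ((N : Int) - 1) - ((i % 7 : Nat) : Int))
          (j := (N : Int) - 1 - (j : Int)) (j' := ((N : Int) - 1) - ((j % 7 : Nat) : Int)) (by omega) (by omega)]
  have m3 : dA (N : Int) (MatN N (fun i j => fA ((N : Int) - 1 - j) ((N : Int) - 1 - ((N : Int) - 1 - i))))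
      = dB (N : Int) (fun i j => valB (((N : Int) - 1) - j) i) := by
    apply master
    intro i j
    rw [fA_eq_valB, fA_eq_valB,
        valB_congr (i := (i : Int)) (i' := ((i % 7 : Nat) : Int)) (j := (j : Int)) (j' := ((j % 7 : Nat) : Int))
          (by omega) (by omega),
        valB_congr (i := (N : Int) - 1 - (j : Int)) (i' := ((N : Int) - 1) - ((j % 7 : Nat) : Int))
          (j := (N : Int) - 1 - ((N : Int) - 1 - (i : Int))) (j' := ((i % 7 : Nat) : Int)) (by omega) (by omega)]
  rw [h3, h2, h1, diff0, m1, m2, m3]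

-- ===== VERDICT (by name: the statement is the Claim_ definition above) =====
theorem solve_spec : Claim_equal_solve := by
  intro n queries _ hpre
  unfold Spec_solve
  have hpre' : (1 : Int) ≤ n := hpre
  obtain ⟨N, rfl⟩ : ∃ N : Nat, n = (N : Int) :=
    ⟨n.toNat, (Int.toNat_of_nonneg (le_trans (by norm_num) hpre')).symm⟩
  have hN : 0 < N := by exact_mod_cast hpre'
  rw [solveA_eq, solveB_eq, ans_eq N hN]
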